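-- pv_equiv track=rewrite | github.com/whyj107/CodeWar | 20220823_Matrices Up and Down Sorting For Each Column.py | up_down_col_sort
-- ===== SOURCE A (Python) =====
-- def up_down_col_sort(matrix):
--     i, arrow = 0, 1
--     result = [[] for _ in matrix]
--     tmp = sorted([m for ma in matrix for m in ma])
--     for t in tmp:
--         result[i].append(t)
--         i += arrow
--         if i == len(result) or i < 0:
--             arrow *= -1
--             i += arrow
--     return result
-- ===== SOURCE B (Python) =====
-- def up_down_col_sort(matrix):
--     n = len(matrix)
--     tmp = sorted(x for row in matrix for x in row)
--     return [[t for k, t in enumerate(tmp)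
--              if min(k % (2 * n), 2 * n - 1 - k % (2 * n)) == r]
--             for r in range(n)]
-- ===== Notes on version B (the rewrite author's own statement) =====
-- stated objective: alternative
-- what changed: Replaces A's single scatter pass (a bouncing cursor with a direction flag appending into a mutable row array) with a gather construction: each row is built independently by one filtered comprehension over the enumerated sorted elements, using the closed-form row function min(k % 2n, 2n-1 - k % 2n).
import Mathlib
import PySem

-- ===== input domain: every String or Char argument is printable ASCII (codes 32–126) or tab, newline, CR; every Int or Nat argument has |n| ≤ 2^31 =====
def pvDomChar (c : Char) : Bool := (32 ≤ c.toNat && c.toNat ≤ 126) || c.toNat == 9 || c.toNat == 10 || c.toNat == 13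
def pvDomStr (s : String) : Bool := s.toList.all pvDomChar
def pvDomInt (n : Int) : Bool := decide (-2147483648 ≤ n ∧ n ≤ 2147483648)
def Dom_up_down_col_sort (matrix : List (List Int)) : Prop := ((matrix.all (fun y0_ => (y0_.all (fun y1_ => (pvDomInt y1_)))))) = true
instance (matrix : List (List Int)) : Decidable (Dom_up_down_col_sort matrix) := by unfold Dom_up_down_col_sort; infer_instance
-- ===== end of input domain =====

-- B builds each row independently by a filtered pass with a closed-form row function
-- min(k % 2n, 2n-1-k % 2n), instead of A's single scatter pass with a bouncing cursor
-- (alternative decomposition; return-value equivalence, A mutates nothing observable).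


-- ===== PORT A =====
-- result[i].append(t): A keeps 0 ≤ i < len(result) at every append, so this in-range
-- structural recursion is exact for every index A actually uses
def pvAppendAtA : List (List Int) → Int → Int → List (List Int)
  | [], _, _ => []
  | r :: rest, i, t => if i = 0 then (r ++ [t]) :: rest else r :: pvAppendAtA rest (i - 1) t

-- one iteration of A's for-loop over state (i, arrow, result)
def pvStepA (st : Int × Int × List (List Int)) (t : Int) : Int × Int × List (List Int) :=
  let result := pvAppendAtA st.2.2 st.1 t
  let i := st.1 + st.2.1
  if i = (result.length : Int) ∨ i < 0 then (i - st.2.1, -st.2.1, result) else (i, st.2.1, result)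

def up_down_col_sort (matrix : List (List Int)) : List (List Int) :=
  let result : List (List Int) := matrix.map (fun _ => [])
  let tmp := PySem.List.sorted (matrix.flatMap (fun ma => ma)) (fun m => m) false
  (tmp.foldl pvStepA (0, 1, result)).2.2

-- ===== PORT B =====
-- [[t for k, t in enumerate(tmp) if min(k % (2n), 2n-1 - k % (2n)) == r] for r in range(n)]
def up_down_col_sort_alt (matrix : List (List Int)) : List (List Int) :=
  let n := matrix.length
  let tmp := PySem.List.sorted (matrix.flatMap (fun row => row)) (fun x => x) false
  (List.range n).map (fun r =>
    ((PySem.List.enumerate tmp 0).filter (fun kt =>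
        min (PySem.Int.mod kt.1 (2 * (n : Int))) (2 * (n : Int) - 1 - PySem.Int.mod kt.1 (2 * (n : Int)))
          == ((r : Nat) : Int))).map (fun kt => kt.2))

-- ===== PRECONDITION & SPEC =====
def Spec_up_down_col_sort (matrix : List (List Int)) (out : List (List Int)) : Prop := out = up_down_col_sort_alt matrix
instance (matrix : List (List Int)) (out : List (List Int)) : Decidable (Spec_up_down_col_sort matrix out) := by unfold Spec_up_down_col_sort; infer_instance

-- ===== CLAIM (what is proved, stated in full; the proofs are below) =====
def Claim_equal_up_down_col_sort : Prop := ∀ (matrix : List (List Int)), Dom_up_down_col_sort matrix → Spec_up_down_col_sort matrix (up_down_col_sort matrix)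

-- ===== LEMMAS AND PROOFS =====

-- the row A's cursor sits on before consuming element k, and its direction
def pvIOf (n k : Nat) : Int := if k % (2 * n) < n then ((k % (2 * n) : Nat) : Int) else 2 * (n : Int) - 1 - ((k % (2 * n) : Nat) : Int)
def pvAOf (n k : Nat) : Int := if k % (2 * n) < n then 1 else -1

-- the elements landing in row r among ts, whose first element has global index k
def pvGather (n : Nat) : Nat → List Int → Nat → List Int
  | _, [], _ => []
  | k, t :: ts, r => if pvIOf n k = (r : Int) then t :: pvGather n (k + 1) ts r else pvGather n (k + 1) ts r

theorem length_pvAppendAtA (res : List (List Int)) (i t : Int) :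
    (pvAppendAtA res i t).length = res.length := by
  induction res generalizing i with
  | nil => rfl
  | cons r rest ih => simp only [pvAppendAtA]; split <;> simp [ih]

theorem getElem_pvAppendAtA (res : List (List Int)) (j : Nat) (t : Int) (r : Nat)
    (hr : r < res.length) :
    (pvAppendAtA res (j : Int) t)[r]'(by rw [length_pvAppendAtA]; exact hr)
      = if r = j then res[r] ++ [t] else res[r] := by
  induction res generalizing j r with
  | nil => simp at hr
  | cons x rest ih =>
    cases j with
    | zero =>
      cases r with
      | zero => simp [pvAppendAtA]
      | succ r' => simp [pvAppendAtA]
    | succ j' =>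
      have h1 : ¬ (((j' + 1 : Nat) : Int) = 0) := by push_cast; omega
      have h2 : ((j' + 1 : Nat) : Int) - 1 = (j' : Int) := by push_cast; ring
      have h3 : pvAppendAtA (x :: rest) ((j' + 1 : Nat) : Int) t
          = x :: pvAppendAtA rest ((j' : Nat) : Int) t := by
        simp only [pvAppendAtA, if_neg h1, h2]
      cases r with
      | zero => simp only [h3]; simp
      | succ r' =>
        simp only [h3, List.getElem_cons_succ]
        have := ih j' r' (by simpa using Nat.lt_of_succ_lt_succ hr)
        simpa [Nat.succ_eq_add_one] using this

theorem getElem_pvAppendAtA_int (res : List (List Int)) (i : Int) (hi : 0 ≤ i) (t : Int)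
    (r : Nat) (hr : r < res.length) :
    (pvAppendAtA res i t)[r]'(by rw [length_pvAppendAtA]; exact hr)
      = if (r : Int) = i then res[r] ++ [t] else res[r] := by
  rcases Int.eq_ofNat_of_zero_le hi with ⟨j, rfl⟩
  rw [getElem_pvAppendAtA res j t r hr]
  by_cases hc : r = j
  · rw [if_pos hc, if_pos (by exact_mod_cast hc)]
  · rw [if_neg hc, if_neg (by exact_mod_cast hc)]

theorem pvIOf_bounds (n k : Nat) (hn : 0 < n) : 0 ≤ pvIOf n k ∧ pvIOf n k < (n : Int) := by
  have hp : k % (2 * n) < 2 * n := Nat.mod_lt _ (by omega)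
  unfold pvIOf; split <;> omega

theorem succ_mod_eq (m k : Nat) (hm : 1 < m) :
    (k + 1) % m = if k % m = m - 1 then 0 else k % m + 1 := by
  have hp : k % m < m := Nat.mod_lt _ (by omega)
  have h1 : (k + 1) % m = (k % m + 1) % m := by
    conv_lhs => rw [Nat.add_mod]
    rw [Nat.mod_eq_of_lt hm]
  rw [h1]
  split
  · next hh => rw [hh, Nat.sub_add_cancel (by omega), Nat.mod_self]
  · next hh => exact Nat.mod_eq_of_lt (by omega)

theorem pvStepA_eq (n k : Nat) (hn : 0 < n) (res : List (List Int)) (h : res.length = n) (t : Int) :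
    pvStepA (pvIOf n k, pvAOf n k, res) t
      = (pvIOf n (k + 1), pvAOf n (k + 1), pvAppendAtA res (pvIOf n k) t) := by
  have hp : k % (2 * n) < 2 * n := Nat.mod_lt _ (by omega)
  have hs := succ_mod_eq (2 * n) k (by omega)
  simp only [pvStepA, pvIOf, pvAOf, length_pvAppendAtA, h, hs]
  split_ifs <;> refine Prod.ext ?_ (Prod.ext ?_ rfl) <;> dsimp only <;> omega

theorem length_foldA (ts : List Int) (st : Int × Int × List (List Int)) :
    ((ts.foldl pvStepA st).2.2).length = st.2.2.length := by
  induction ts generalizing st with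
  | nil => rfl
  | cons t ts ih =>
    rw [List.foldl_cons, ih]
    simp only [pvStepA]
    split <;> simp [length_pvAppendAtA]

theorem foldA_getElem (n : Nat) (hn : 0 < n) (ts : List Int) :
    ∀ (k : Nat) (res : List (List Int)) (h : res.length = n) (r : Nat) (hr : r < n),
      ((ts.foldl pvStepA (pvIOf n k, pvAOf n k, res)).2.2)[r]'(by rw [length_foldA]; dsimp only; omega)
        = res[r]'(by omega) ++ pvGather n k ts r := by
  induction ts with
  | nil => intro k res h r hr; simp [List.foldl_nil, pvGather]
  | cons t ts ih =>
    intro k res h r hr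
    simp only [List.foldl_cons, pvStepA_eq n k hn res h t]
    have hb := pvIOf_bounds n k hn
    have hres' : (pvAppendAtA res (pvIOf n k) t).length = n := by rw [length_pvAppendAtA, h]
    rw [ih (k + 1) _ hres' r hr]
    rw [getElem_pvAppendAtA_int res (pvIOf n k) hb.1 t r (by omega)]
    simp only [pvGather]
    by_cases hc : pvIOf n k = (r : Int)
    · rw [if_pos (by omega : (r : Int) = pvIOf n k), if_pos hc]; simp
    · rw [if_neg (by omega : ¬ (r : Int) = pvIOf n k), if_neg hc]

theorem min_eq_pvIOf (n k : Nat) (hn : 0 < n) :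
    min (PySem.Int.mod (k : Int) (2 * (n : Int))) (2 * (n : Int) - 1 - PySem.Int.mod (k : Int) (2 * (n : Int)))
      = pvIOf n k := by
  have hcast : (2 * (n : Int)) = ((2 * n : Nat) : Int) := by push_cast; ring
  rw [hcast, PySem.Int.mod_natCast]
  have hp : k % (2 * n) < 2 * n := Nat.mod_lt _ (by omega)
  unfold pvIOf
  by_cases hc : k % (2 * n) < n
  · rw [if_pos hc, min_eq_left (by omega)]
  · rw [if_neg hc, min_eq_right (by omega)]
    push_cast; ring

theorem filterB_eq_pvGather (n : Nat) (hn : 0 < n) (r : Nat) (ts : List Int) :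
    ∀ (k : Nat),
      ((PySem.List.enumerate ts (k : Int)).filter (fun kt =>
          min (PySem.Int.mod kt.1 (2 * (n : Int))) (2 * (n : Int) - 1 - PySem.Int.mod kt.1 (2 * (n : Int)))
            == ((r : Nat) : Int))).map (fun kt => kt.2) = pvGather n k ts r := by
  induction ts with
  | nil => intro k; simp [PySem.List.enumerate_nil, pvGather]
  | cons t ts ih =>
    intro k
    rw [PySem.List.enumerate_cons]
    have hk1 : (k : Int) + 1 = ((k + 1 : Nat) : Int) := by push_cast; ring
    rw [List.filter_cons]
    simp only [min_eq_pvIOf n k hn]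
    by_cases hc : pvIOf n k = (r : Int)
    · rw [if_pos (by simpa using hc)]
      simp only [List.map_cons, pvGather, if_pos hc, hk1, ih (k + 1)]
    · rw [if_neg (by simpa using hc)]
      simp only [pvGather, if_neg hc, hk1, ih (k + 1)]

-- ===== VERDICT (by name: the statement is the Claim_ definition above) =====
theorem up_down_col_sort_spec : Claim_equal_up_down_col_sort := by
  intro matrix _
  unfold Spec_up_down_col_sort
  by_cases hm : matrix = []
  · subst hm; rfl
  · have hn : 0 < matrix.length := List.length_pos_iff.mpr hm
    have hlen0 : (matrix.map (fun _ => ([] : List Int))).length = matrix.length := by simp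
    have hlenA : (up_down_col_sort matrix).length = matrix.length := by
      simp only [up_down_col_sort]; rw [length_foldA]; simp
    have hlenB : (up_down_col_sort_alt matrix).length = matrix.length := by
      simp [up_down_col_sort_alt]
    apply List.ext_getElem (by rw [hlenA, hlenB])
    intro r hr1 hr2
    have hrn : r < matrix.length := by rwa [hlenA] at hr1
    have h0 : pvIOf matrix.length 0 = 0 := by unfold pvIOf; simp [hn]
    have h1 : pvAOf matrix.length 0 = 1 := by unfold pvAOf; simp [hn]
    have key := foldA_getElem matrix.length hn
      (PySem.List.sorted (matrix.flatMap (fun ma => ma)) (fun m => m) false) 0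
      (matrix.map (fun _ => [])) hlen0 r hrn
    rw [h0, h1] at key
    have hA : (up_down_col_sort matrix)[r]'hr1
        = pvGather matrix.length 0
            (PySem.List.sorted (matrix.flatMap (fun ma => ma)) (fun m => m) false) r := by
      simp only [up_down_col_sort]
      exact key.trans (by simp)
    have hB : (up_down_col_sort_alt matrix)[r]'hr2
        = pvGather matrix.length 0
            (PySem.List.sorted (matrix.flatMap (fun ma => ma)) (fun m => m) false) r := by
      simp only [up_down_col_sort_alt]
      rw [List.getElem_map, List.getElem_range]
      have hfil := filterB_eq_pvGather matrix.length hn r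
        (PySem.List.sorted (matrix.flatMap (fun ma => ma)) (fun m => m) false) 0
      simpa using hfil
    rw [hA, hB]
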